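-- pv_equiv track=rewrite | github.com/SpangeWenkies/mental-math-quant-prep-cli | mental_math_cli.py | finite_decimal_places
-- ===== SOURCE A (Python) =====
-- def finite_decimal_places(denominator: int) -> int | None:
--     d = denominator
--     twos = 0
--     fives = 0
--     while d % 2 == 0:
--         twos += 1
--         d //= 2
--     while d % 5 == 0:
--         fives += 1
--         d //= 5
--     if d != 1:
--         return None
--     return max(twos, fives)
-- ===== SOURCE B (Python) =====
-- def _strip(d, p):
--     """Divide out factors of p, returning (reduced d, number of factors removed)."""
--     n = 0
--     while d % p == 0:
--         d //= p
--         n += 1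
--     return d, n
--
--
-- def finite_decimal_places(denominator: int) -> int | None:
--     d, places = _strip(denominator, 10)
--     d, twos = _strip(d, 2)
--     d, fives = _strip(d, 5)
--     if d != 1:
--         return None
--     return places + twos + fives
-- ===== Notes on version B (the rewrite author's own statement) =====
-- stated objective: alternative
-- what changed: B uses one generic factor-stripping helper applied to 10, then 2, then 5, keeping a single running count and returning the sum instead of A's two separate counters combined with max.
import Mathlib
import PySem

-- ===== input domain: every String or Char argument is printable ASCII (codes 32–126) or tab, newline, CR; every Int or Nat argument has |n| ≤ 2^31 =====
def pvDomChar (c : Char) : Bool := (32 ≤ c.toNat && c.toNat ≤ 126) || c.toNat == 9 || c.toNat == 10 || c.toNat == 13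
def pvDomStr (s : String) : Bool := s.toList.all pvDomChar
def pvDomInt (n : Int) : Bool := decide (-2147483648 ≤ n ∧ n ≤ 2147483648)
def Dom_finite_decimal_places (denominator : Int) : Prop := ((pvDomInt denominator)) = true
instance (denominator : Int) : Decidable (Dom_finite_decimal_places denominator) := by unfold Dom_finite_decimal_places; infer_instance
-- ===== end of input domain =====

-- B strips factors with one generic helper applied to 10, 2, 5 and sums one running count,
-- instead of A's two counters (for 2 and 5) combined with max; same cost, different decomposition.

-- termination measure lemma used by the ports ('d ≠ 0' / '1 < p' guards exist only to make the loops total;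
-- on the claimed domain (denominator ≠ 0) they never alter the Python behaviour)
lemma pv_natAbs_floordiv_lt (d p : Int) (hp : 1 < p) (hmod : PySem.Int.mod d p = 0) (hd : d ≠ 0) :
    (PySem.Int.floordiv d p).natAbs < d.natAbs := by
  have hp0 : 0 < p := by omega
  obtain ⟨k, hk⟩ := (PySem.Int.mod_eq_zero_iff_dvd d p).mp hmod
  subst hk
  rw [PySem.Int.floordiv_eq_ediv_of_pos hp0, Int.mul_ediv_cancel_left _ (by omega)]
  have hk0 : k ≠ 0 := by rintro rfl; simp at hd
  rw [Int.natAbs_mul]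
  have h2 : 2 ≤ p.natAbs := by omega
  have hk1 : 1 ≤ k.natAbs := by omega
  nlinarith

-- ===== PORT A =====
-- the first while loop of A (state: counter 'twos' and 'd')
def pvA_loop2 (twos d : Int) : Int × Int :=
  if h : PySem.Int.mod d 2 = 0 ∧ d ≠ 0 then pvA_loop2 (twos + 1) (PySem.Int.floordiv d 2)
  else (twos, d)
termination_by d.natAbs
decreasing_by exact pv_natAbs_floordiv_lt d 2 (by norm_num) h.1 h.2

-- the second while loop of A (state: counter 'fives' and 'd')
def pvA_loop5 (fives d : Int) : Int × Int :=
  if h : PySem.Int.mod d 5 = 0 ∧ d ≠ 0 then pvA_loop5 (fives + 1) (PySem.Int.floordiv d 5)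
  else (fives, d)
termination_by d.natAbs
decreasing_by exact pv_natAbs_floordiv_lt d 5 (by norm_num) h.1 h.2

def finite_decimal_places (denominator : Int) : Option Int :=
  let d := denominator
  let r2 := pvA_loop2 0 d
  let r5 := pvA_loop5 0 r2.2
  if r5.2 ≠ 1 then none else some (max r2.1 r5.1)

-- ===== PORT B =====
-- the while loop of _strip (state: 'd' and counter 'n')
def pvStripGo (d p n : Int) : Int × Int :=
  if h : PySem.Int.mod d p = 0 ∧ d ≠ 0 ∧ 1 < p then pvStripGo (PySem.Int.floordiv d p) p (n + 1)
  else (d, n)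
termination_by d.natAbs
decreasing_by exact pv_natAbs_floordiv_lt d p h.2.2 h.1 h.2.1

-- _strip(d, p) of Source B
def pvStrip (d p : Int) : Int × Int := pvStripGo d p 0

def finite_decimal_places_alt (denominator : Int) : Option Int :=
  let r10 := pvStrip denominator 10
  let r2 := pvStrip r10.1 2
  let r5 := pvStrip r2.1 5
  if r5.1 ≠ 1 then none else some (r10.2 + r2.2 + r5.2)

-- ===== PRECONDITION & SPEC =====
-- Pre_ excludes denominator = 0, on which the Python A loops forever (0 % 2 == 0 always) and never returns.
def Pre_finite_decimal_places (denominator : Int) : Prop := denominator ≠ 0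
instance (denominator : Int) : Decidable (Pre_finite_decimal_places denominator) := by
  unfold Pre_finite_decimal_places; infer_instance
def pvWitness_finite_decimal_places : Int := (8)

def Spec_finite_decimal_places (denominator : Int) (out : Option Int) : Prop := out = finite_decimal_places_alt denominator
instance (denominator : Int) (out : Option Int) : Decidable (Spec_finite_decimal_places denominator out) := by unfold Spec_finite_decimal_places; infer_instance

-- ===== CLAIM (what is proved, stated in full; the proofs are below) =====
def Claim_equal_finite_decimal_places : Prop := ∀ (denominator : Int), Dom_finite_decimal_places denominator → Pre_finite_decimal_places denominator → Spec_finite_decimal_places denominator (finite_decimal_places denominator)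

-- ===== LEMMAS AND PROOFS =====


lemma pvStripGo_char (p : Int) (hp : 1 < p) (d n : Int) : d ≠ 0 →
    ∃ (k : Nat) (e : Int), pvStripGo d p n = (e, n + k) ∧ d = p ^ k * e ∧ ¬(p ∣ e) := by
  induction d, n using pvStripGo.induct (p := p) with
  | case1 d n h ih =>
    intro _
    obtain ⟨hmod, hd0, hp1⟩ := h
    obtain ⟨c, hc⟩ := (PySem.Int.mod_eq_zero_iff_dvd d p).mp hmod
    have hfd : PySem.Int.floordiv d p = c := by
      rw [hc, PySem.Int.floordiv_eq_ediv_of_pos (by omega), Int.mul_ediv_cancel_left _ (by omega)]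
    have hc0 : c ≠ 0 := by rintro rfl; simp at hc; exact hd0 hc
    obtain ⟨k, e, h1, h2, h3⟩ := ih (by rw [hfd]; exact hc0)
    refine ⟨k + 1, e, ?_, ?_, h3⟩
    · rw [pvStripGo, dif_pos ⟨hmod, hd0, hp1⟩, h1]
      refine Prod.ext rfl ?_
      push_cast; ring
    · rw [hfd] at h2
      rw [hc, h2, pow_succ]; ring
  | case2 d n h =>
    intro hd
    have hnd : ¬ (p ∣ d) := by
      intro hdvd
      exact h ⟨(PySem.Int.mod_eq_zero_iff_dvd d p).mpr hdvd, hd, hp⟩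
    refine ⟨0, d, ?_, by simp, hnd⟩
    rw [pvStripGo, dif_neg h]; simp

lemma pvA_loop2_char (twos d : Int) : d ≠ 0 →
    ∃ (k : Nat) (e : Int), pvA_loop2 twos d = (twos + k, e) ∧ d = 2 ^ k * e ∧ ¬((2:Int) ∣ e) := by
  induction twos, d using pvA_loop2.induct with
  | case1 twos d h ih =>
    intro _
    obtain ⟨hmod, hd0⟩ := h
    obtain ⟨c, hc⟩ := (PySem.Int.mod_eq_zero_iff_dvd d 2).mp hmod
    have hfd : PySem.Int.floordiv d 2 = c := by
      rw [hc, PySem.Int.floordiv_eq_ediv_of_pos (by norm_num), Int.mul_ediv_cancel_left _ (by norm_num)]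
    have hc0 : c ≠ 0 := by rintro rfl; simp at hc; exact hd0 hc
    obtain ⟨k, e, h1, h2, h3⟩ := ih (by rw [hfd]; exact hc0)
    refine ⟨k + 1, e, ?_, ?_, h3⟩
    · rw [pvA_loop2, dif_pos ⟨hmod, hd0⟩, h1]
      refine Prod.ext ?_ rfl
      push_cast; ring
    · rw [hfd] at h2
      rw [hc, h2, pow_succ]; ring
  | case2 twos d h =>
    intro hd
    have hnd : ¬ ((2:Int) ∣ d) := by
      intro hdvd
      exact h ⟨(PySem.Int.mod_eq_zero_iff_dvd d 2).mpr hdvd, hd⟩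
    refine ⟨0, d, ?_, by simp, hnd⟩
    rw [pvA_loop2, dif_neg h]; simp

lemma pvA_loop5_char (fives d : Int) : d ≠ 0 →
    ∃ (k : Nat) (e : Int), pvA_loop5 fives d = (fives + k, e) ∧ d = 5 ^ k * e ∧ ¬((5:Int) ∣ e) := by
  induction fives, d using pvA_loop5.induct with
  | case1 fives d h ih =>
    intro _
    obtain ⟨hmod, hd0⟩ := h
    obtain ⟨c, hc⟩ := (PySem.Int.mod_eq_zero_iff_dvd d 5).mp hmod
    have hfd : PySem.Int.floordiv d 5 = c := by
      rw [hc, PySem.Int.floordiv_eq_ediv_of_pos (by norm_num), Int.mul_ediv_cancel_left _ (by norm_num)]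
    have hc0 : c ≠ 0 := by rintro rfl; simp at hc; exact hd0 hc
    obtain ⟨k, e, h1, h2, h3⟩ := ih (by rw [hfd]; exact hc0)
    refine ⟨k + 1, e, ?_, ?_, h3⟩
    · rw [pvA_loop5, dif_pos ⟨hmod, hd0⟩, h1]
      refine Prod.ext ?_ rfl
      push_cast; ring
    · rw [hfd] at h2
      rw [hc, h2, pow_succ]; ring
  | case2 fives d h =>
    intro hd
    have hnd : ¬ ((5:Int) ∣ d) := by
      intro hdvd
      exact h ⟨(PySem.Int.mod_eq_zero_iff_dvd d 5).mpr hdvd, hd⟩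
    refine ⟨0, d, ?_, by simp, hnd⟩
    rw [pvA_loop5, dif_neg h]; simp

lemma pv_not_dvd_pow_mul (p q w : Int) (Y : Nat) (hp : Prime p) (hq : ¬ p ∣ q) (hw : ¬ p ∣ w) :
    ¬ p ∣ q ^ Y * w := by
  intro h
  rcases hp.dvd_mul.mp h with h | h
  · exact hq (hp.dvd_of_dvd_pow h)
  · exact hw h

lemma pv_pow_part_unique (p : Int) (hp : Prime p) (Y Y' : Nat) (w w' : Int)
    (hw : ¬ p ∣ w) (hw' : ¬ p ∣ w') (h : p ^ Y * w = p ^ Y' * w') : Y = Y' ∧ w = w' := by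
  induction Y generalizing Y' with
  | zero =>
    cases Y' with
    | zero => simpa using h
    | succ Y' =>
      exfalso; apply hw
      have : w = p ^ (Y' + 1) * w' := by simpa using h
      rw [this]
      exact Dvd.dvd.mul_right (dvd_pow_self p (Nat.succ_ne_zero _)) _
  | succ Y ih =>
    cases Y' with
    | zero =>
      exfalso; apply hw'
      have : w' = p ^ (Y + 1) * w := by simpa using h.symm
      rw [this]
      exact Dvd.dvd.mul_right (dvd_pow_self p (Nat.succ_ne_zero _)) _
    | succ Y' =>
      have h' : p ^ Y * w = p ^ Y' * w' := by
        apply mul_left_cancel₀ hp.ne_zero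
        calc p * (p ^ Y * w) = p ^ (Y + 1) * w := by ring
        _ = p ^ (Y' + 1) * w' := h
        _ = p * (p ^ Y' * w') := by ring
      obtain ⟨h1, h2⟩ := ih Y' h'
      exact ⟨by omega, h2⟩

lemma pv_normal_unique (X Y X' Y' : Nat) (w w' : Int)
    (hw2 : ¬((2:Int) ∣ w)) (hw5 : ¬((5:Int) ∣ w)) (hw2' : ¬((2:Int) ∣ w')) (hw5' : ¬((5:Int) ∣ w'))
    (h : 2 ^ X * 5 ^ Y * w = 2 ^ X' * 5 ^ Y' * w') : X = X' ∧ Y = Y' ∧ w = w' := by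
  have p2 : Prime (2:Int) := Int.prime_two
  have p5 : Prime (5:Int) := by rw [Int.prime_iff_natAbs_prime]; norm_num
  have h2 : (2:Int) ^ X * (5 ^ Y * w) = 2 ^ X' * (5 ^ Y' * w') := by
    rw [← mul_assoc, ← mul_assoc]; exact h
  obtain ⟨hX, hrest⟩ := pv_pow_part_unique 2 p2 X X' _ _
    (pv_not_dvd_pow_mul 2 5 w Y p2 (by decide) hw2)
    (pv_not_dvd_pow_mul 2 5 w' Y' p2 (by decide) hw2') h2
  obtain ⟨hY, hww⟩ := pv_pow_part_unique 5 p5 Y Y' _ _ hw5 hw5' hrest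
  exact ⟨hX, hY, hww⟩

-- ===== VERDICT (by name: the statement is the Claim_ definition above) =====
theorem finite_decimal_places_spec : Claim_equal_finite_decimal_places := by
  intro d _ hd
  simp only [Spec_finite_decimal_places, finite_decimal_places, finite_decimal_places_alt, pvStrip]
  obtain ⟨x, u, hA2, hdu, hu2⟩ := pvA_loop2_char 0 d hd
  have hu0 : u ≠ 0 := by rintro rfl; simp at hdu; exact hd hdu
  obtain ⟨y, v, hA5, huv, hv5⟩ := pvA_loop5_char 0 u hu0
  have hv0 : v ≠ 0 := by rintro rfl; simp at huv; exact hu0 huv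
  have hv2 : ¬ ((2:Int) ∣ v) := fun hc => hu2 (huv ▸ Dvd.dvd.mul_left hc _)
  obtain ⟨t, e1, hB10, hde1, he110⟩ := pvStripGo_char 10 (by norm_num) d 0 hd
  have he10 : e1 ≠ 0 := by rintro rfl; simp at hde1; exact hd hde1
  obtain ⟨a, e2, hB2, he1e2, he22⟩ := pvStripGo_char 2 (by norm_num) e1 0 he10
  have he20 : e2 ≠ 0 := by rintro rfl; simp at he1e2; exact he10 he1e2
  obtain ⟨b, e3, hB5, he2e3, he35⟩ := pvStripGo_char 5 (by norm_num) e2 0 he20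
  have he32 : ¬ ((2:Int) ∣ e3) := fun hc => he22 (he2e3 ▸ Dvd.dvd.mul_left hc _)
  -- the two normal forms of d
  have hAform : d = 2 ^ x * 5 ^ y * v := by rw [hdu, huv]; ring
  have hBform : d = 2 ^ (t + a) * 5 ^ (t + b) * e3 := by
    rw [hde1, he1e2, he2e3]
    have : (10:Int) ^ t = 2 ^ t * 5 ^ t := by rw [← mul_pow]; norm_num
    rw [this, pow_add, pow_add]; ring
  obtain ⟨hx, hy, hve⟩ := pv_normal_unique x y (t + a) (t + b) v e3 hv2 hv5 he32 he35
    (hAform ▸ hBform)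
  -- a = 0 or b = 0, since 10 does not divide e1
  have hab : a = 0 ∨ b = 0 := by
    by_contra hcon
    push Not at hcon
    apply he110
    obtain ⟨a', rfl⟩ : ∃ a', a = a' + 1 := ⟨a - 1, by omega⟩
    obtain ⟨b', rfl⟩ : ∃ b', b = b' + 1 := ⟨b - 1, by omega⟩
    refine ⟨2 ^ a' * 5 ^ b' * e3, ?_⟩
    rw [he1e2, he2e3, pow_succ, pow_succ]; ring
  rw [hA2, hA5, hB10, hB2, hB5]
  simp only [hve]
  by_cases he3 : e3 = 1
  · simp only [he3, ne_eq, not_true_eq_false, if_false]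
    congr 1
    subst hx hy
    rcases hab with rfl | rfl <;> (push_cast; omega)
  · simp [he3]
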